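-- pv_equiv track=rewrite | github.com/Mangern/kattis | laki/main.py | to_may
-- ===== SOURCE A (Python) =====
-- may = [chr(0x1d2e0+i) for i in range(20)]
--
-- def to_may(x):
--     pw = 1
--     while pw * 20 <= x:
--         pw *= 20
--     ret=[]
--     while pw > 0:
--         num = x // pw
--         ret.append(may[num])
--         x -= num * pw
--         pw //= 20
--     return "".join(ret)
-- ===== SOURCE B (Python) =====
-- may = [chr(0x1d2e0+i) for i in range(20)]
--
-- def to_may(x):
--     if x < 20:
--         return may[x]
--     return to_may(x // 20) + may[x % 20]
-- ===== Notes on version B (the rewrite author's own statement) =====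
-- stated objective: simpler
-- what changed: Replaced A's two loops (find highest power of 20, then peel digits MSB-first) with a three-line recursion that divides by 20 and appends the least-significant digit on the way out.
import Mathlib
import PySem

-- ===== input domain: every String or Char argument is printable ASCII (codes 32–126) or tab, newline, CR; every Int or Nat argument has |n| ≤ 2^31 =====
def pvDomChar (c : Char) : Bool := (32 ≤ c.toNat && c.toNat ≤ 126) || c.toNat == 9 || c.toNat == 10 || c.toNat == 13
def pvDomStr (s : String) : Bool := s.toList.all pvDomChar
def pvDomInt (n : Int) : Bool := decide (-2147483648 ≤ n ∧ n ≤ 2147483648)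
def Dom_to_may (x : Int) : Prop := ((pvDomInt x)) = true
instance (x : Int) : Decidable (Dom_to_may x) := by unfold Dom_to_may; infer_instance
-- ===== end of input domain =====

-- B is simpler: A's two loops (find the highest power of 20, then peel digits MSB-first) become a
-- three-line recursion that divides by 20 and appends the least-significant digit on the way out.

-- the module-level list `may` (the twenty base-20 digit characters U+1D2E0 …)
def mayChars : List Char := (List.range 20).map (fun i => Char.ofNat (0x1d2e0 + i))

-- ===== PORT A =====
-- first while loop: pw = 1; while pw * 20 <= x: pw *= 20   (the 0 < pw conjunct only makes the
-- recursion total for arbitrary pw; it is true at the call site pw = 1 and preserved)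
def findPw (x pw : Int) : Int :=
  if h : 0 < pw ∧ pw * 20 ≤ x then findPw x (pw * 20) else pw
termination_by (x - pw).toNat
decreasing_by obtain ⟨h1, h2⟩ := h; omega

-- second while loop: while pw > 0: num = x // pw; ret.append(may[num]); x -= num*pw; pw //= 20
-- may[num] can raise IndexError (pyGet? = none): the loop then returns none.
def loopA (x pw : Int) (ret : List Char) : Option (List Char) :=
  if h : 0 < pw then
    let num := PySem.Int.floordiv x pw
    match PySem.List.pyGet? mayChars num with
    | none => none
    | some c => loopA (x - num * pw) (PySem.Int.floordiv pw 20) (ret ++ [c])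
  else some ret
termination_by pw.toNat
decreasing_by
  have : PySem.Int.floordiv pw 20 = pw / 20 := PySem.Int.floordiv_eq_ediv_of_pos (by omega)
  omega

def to_may (x : Int) : String :=
  match loopA x (findPw x 1) [] with
  | some l => String.ofList l   -- "".join(ret)
  | none => ""                  -- IndexError (outside Pre_to_may)

-- ===== PORT B =====
def to_may_alt (x : Int) : String :=
  if h : x < 20 then
    match PySem.List.pyGet? mayChars x with
    | some c => String.ofList [c]
    | none => ""                -- IndexError (outside Pre_to_may)
  else
    to_may_alt (PySem.Int.floordiv x 20) ++
      (match PySem.List.pyGet? mayChars (PySem.Int.mod x 20) with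
       | some c => String.ofList [c]
       | none => "")
termination_by x.toNat
decreasing_by
  have : PySem.Int.floordiv x 20 = x / 20 := PySem.Int.floordiv_eq_ediv_of_pos (by omega)
  omega

-- ===== PRECONDITION & SPEC =====
-- Pre_ excludes exactly x < -20, where Python's may[x] raises IndexError (in both A and B).
def Pre_to_may (x : Int) : Prop := -20 ≤ x
instance (x : Int) : Decidable (Pre_to_may x) := by unfold Pre_to_may; infer_instance
def pvWitness_to_may : Int := (437)

def Spec_to_may (x : Int) (out : String) : Prop := out = to_may_alt x
instance (x : Int) (out : String) : Decidable (Spec_to_may x out) := by unfold Spec_to_may; infer_instance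

-- ===== CLAIM (what is proved, stated in full; the proofs are below) =====
def Claim_equal_to_may : Prop := ∀ (x : Int), Dom_to_may x → Pre_to_may x → Spec_to_may x (to_may x)

-- ===== LEMMAS AND PROOFS =====

def digitChar (d : Int) : Char := Char.ofNat (0x1d2e0 + d.toNat)

-- fixed-width (k+1 digits) base-20 digit list of x, least-significant decomposition
def padDigits (k : Nat) (x : Int) : List Char :=
  match k with
  | 0 => [digitChar x]
  | k + 1 => padDigits k (x / 20) ++ [digitChar (x % 20)]

theorem pyGet?_mayChars (d : Int) (h0 : 0 ≤ d) (h1 : d < 20) :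
    PySem.List.pyGet? mayChars d = some (digitChar d) := by
  interval_cases d <;> decide

theorem findPw_small (x : Int) (h : x < 20) : findPw x 1 = 1 := by
  unfold findPw; simp; omega

theorem floordiv_one (x : Int) : PySem.Int.floordiv x 1 = x := by
  rw [PySem.Int.floordiv_eq_ediv_of_pos (by omega)]; simp

theorem loopA_small (x : Int) (acc : List Char) :
    loopA x 1 acc = match PySem.List.pyGet? mayChars x with
      | some c => some (acc ++ [c]) | none => none := by
  rw [loopA]
  simp only [floordiv_one]
  have h20 : PySem.Int.floordiv 1 20 = 0 := by decide
  rcases hg : PySem.List.pyGet? mayChars x with _ | c <;> simp [hg, h20, loopA]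

theorem findPw_spec (x pw : Int) (hpw : 0 < pw) (hle : pw ≤ x) :
    ∃ k : Nat, findPw x pw = pw * 20 ^ k ∧ pw * 20 ^ k ≤ x ∧ x < pw * 20 ^ (k + 1) := by
  revert hpw hle
  fun_induction findPw x pw with
  | case1 pw h ih =>
    intro hpw hle
    obtain ⟨k, hk, h1, h2⟩ := ih (by omega) (by omega)
    have e1 : pw * 20 ^ (k + 1) = pw * 20 * 20 ^ k := by ring
    have e2 : pw * 20 ^ (k + 1 + 1) = pw * 20 * 20 ^ (k + 1) := by ring
    exact ⟨k + 1, by rw [hk]; ring, by omega, by omega⟩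
  | case2 pw h =>
    intro hpw hle
    refine ⟨0, by norm_num, by simpa using hle, ?_⟩
    have : (20:Int) ^ (0 + 1) = 20 := by norm_num
    omega

theorem padDigits_msb (k : Nat) : ∀ (x : Int), 0 ≤ x →
    padDigits (k + 1) x =
      digitChar (x / 20 ^ (k + 1)) :: padDigits k (x % 20 ^ (k + 1)) := by
  induction k with
  | zero =>
    intro x hx
    simp [padDigits]
  | succ k ih =>
    intro x hx
    have hq := Int.ediv_add_emod x (20 ^ (k + 2))
    have hr0 : (0:Int) ≤ x % 20 ^ (k + 2) := Int.emod_nonneg x (by positivity)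
    have hrlt : x % 20 ^ (k + 2) < 20 ^ (k + 2) := Int.emod_lt_of_pos x (by positivity)
    have h1 : x / 20 = 20 ^ (k + 1) * (x / 20 ^ (k + 2)) + x % 20 ^ (k + 2) / 20 := by
      conv_lhs => rw [← hq]
      have e : (20:Int) ^ (k + 2) * (x / 20 ^ (k + 2)) + x % 20 ^ (k + 2)
             = x % 20 ^ (k + 2) + (20 ^ (k + 1) * (x / 20 ^ (k + 2))) * 20 := by ring
      rw [e, Int.add_mul_ediv_right _ _ (by norm_num)]
      ring
    have hr20 : x % 20 ^ (k + 2) / 20 < 20 ^ (k + 1) := by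
      rw [Int.ediv_lt_iff_lt_mul (by norm_num)]
      calc x % 20 ^ (k + 2) < 20 ^ (k + 2) := hrlt
        _ = 20 ^ (k + 1) * 20 := by ring
    have hr200 : (0:Int) ≤ x % 20 ^ (k + 2) / 20 := Int.ediv_nonneg hr0 (by norm_num)
    have hdd : x / 20 / 20 ^ (k + 1) = x / 20 ^ (k + 2) := by
      rw [h1]
      have e : (20:Int) ^ (k + 1) * (x / 20 ^ (k + 2)) + x % 20 ^ (k + 2) / 20
             = x % 20 ^ (k + 2) / 20 + x / 20 ^ (k + 2) * 20 ^ (k + 1) := by ring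
      rw [e, Int.add_mul_ediv_right _ _ (by positivity : (0:Int) < 20 ^ (k+1)).ne',
          Int.ediv_eq_zero_of_lt hr200 hr20]
      ring
    have hmd : (x / 20) % 20 ^ (k + 1) = x % 20 ^ (k + 2) / 20 := by
      rw [h1]
      have e : (20:Int) ^ (k + 1) * (x / 20 ^ (k + 2)) + x % 20 ^ (k + 2) / 20
             = x % 20 ^ (k + 2) / 20 + 20 ^ (k + 1) * (x / 20 ^ (k + 2)) := by ring
      rw [e, Int.add_mul_emod_self_left, Int.emod_eq_of_lt hr200 hr20]
    have hmm : x % 20 ^ (k + 2) % 20 = x % 20 := by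
      rw [Int.emod_emod_of_dvd _ ⟨20 ^ (k + 1), by ring⟩]
    calc padDigits (k + 2) x
        = padDigits (k + 1) (x / 20) ++ [digitChar (x % 20)] := rfl
      _ = (digitChar (x / 20 / 20 ^ (k + 1)) :: padDigits k ((x / 20) % 20 ^ (k + 1))) ++ [digitChar (x % 20)] := by
          rw [ih (x / 20) (by positivity)]
      _ = digitChar (x / 20 ^ (k + 2)) :: (padDigits k (x % 20 ^ (k + 2) / 20) ++ [digitChar (x % 20 ^ (k + 2) % 20)]) := by
          rw [hdd, hmd, hmm]; simp
      _ = digitChar (x / 20 ^ (k + 2)) :: padDigits (k + 1) (x % 20 ^ (k + 2)) := rfl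

theorem loopA_eq (k : Nat) : ∀ (x : Int) (acc : List Char), 0 ≤ x → x < 20 ^ (k + 1) →
    loopA x (20 ^ k) acc = some (acc ++ padDigits k x) := by
  induction k with
  | zero =>
    intro x acc h0 h1
    rw [pow_zero, loopA_small, pyGet?_mayChars x h0 (by simpa using h1)]
    rfl
  | succ k ih =>
    intro x acc h0 h1
    have hp : (0:Int) < 20 ^ (k + 1) := by positivity
    rw [loopA, dif_pos hp]
    have hfd : PySem.Int.floordiv x (20 ^ (k + 1)) = x / 20 ^ (k + 1) :=
      PySem.Int.floordiv_eq_ediv_of_pos hp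
    have hnum0 : (0:Int) ≤ x / 20 ^ (k + 1) := Int.ediv_nonneg h0 (by positivity)
    have hnum20 : x / 20 ^ (k + 1) < 20 := by
      rw [Int.ediv_lt_iff_lt_mul hp]
      calc x < 20 ^ (k + 1 + 1) := h1
        _ = 20 * 20 ^ (k + 1) := by ring
    have hpw20 : PySem.Int.floordiv (20 ^ (k + 1)) 20 = 20 ^ k := by
      rw [PySem.Int.floordiv_eq_ediv_of_pos (by norm_num)]
      rw [pow_succ, Int.mul_ediv_cancel _ (by norm_num)]
    have hsub : x - x / 20 ^ (k + 1) * 20 ^ (k + 1) = x % 20 ^ (k + 1) := by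
      rw [Int.emod_def]; ring
    simp only [hfd, pyGet?_mayChars _ hnum0 hnum20, hpw20, hsub]
    rw [ih (x % 20 ^ (k + 1)) (acc ++ [digitChar (x / 20 ^ (k + 1))])
          (Int.emod_nonneg x hp.ne') (Int.emod_lt_of_pos x hp)]
    rw [padDigits_msb k x h0]
    simp

theorem alt_eq (k : Nat) : ∀ (x : Int), 20 ^ k ≤ x → x < 20 ^ (k + 1) →
    to_may_alt x = String.ofList (padDigits k x) := by
  induction k with
  | zero =>
    intro x h0 h1
    rw [to_may_alt, dif_pos (by simpa using h1),
        pyGet?_mayChars x (le_trans zero_le_one (by simpa using h0)) (by simpa using h1)]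
    rfl
  | succ k ih =>
    intro x h0 h1
    have h20 : (20:Int) ≤ 20 ^ (k + 1) := by
      calc (20:Int) = 20 ^ 1 := (pow_one _).symm
        _ ≤ 20 ^ (k + 1) := pow_le_pow_right₀ (by norm_num) (by omega)
    rw [to_may_alt, dif_neg (by omega)]
    have hfd : PySem.Int.floordiv x 20 = x / 20 :=
      PySem.Int.floordiv_eq_ediv_of_pos (by norm_num)
    have hmod : PySem.Int.mod x 20 = x % 20 :=
      PySem.Int.mod_eq_emod_of_pos (by norm_num)
    have hlo : 20 ^ k ≤ x / 20 := by
      rw [Int.le_ediv_iff_mul_le (by norm_num)]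
      calc (20:Int) ^ k * 20 = 20 ^ (k + 1) := by ring
        _ ≤ x := h0
    have hhi : x / 20 < 20 ^ (k + 1) := by
      rw [Int.ediv_lt_iff_lt_mul (by norm_num)]
      calc x < 20 ^ (k + 1 + 1) := h1
        _ = 20 ^ (k + 1) * 20 := by ring
    rw [hfd, hmod, ih (x / 20) hlo hhi,
        pyGet?_mayChars _ (Int.emod_nonneg x (by norm_num)) (Int.emod_lt_of_pos x (by norm_num))]
    rw [show padDigits (k + 1) x = padDigits k (x / 20) ++ [digitChar (x % 20)] from rfl]
    simp

theorem small_case (x : Int) (h : x < 20) : to_may x = to_may_alt x := by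
  rw [to_may_alt, dif_pos h]
  unfold to_may
  rw [findPw_small x h, loopA_small]
  rcases PySem.List.pyGet? mayChars x with _ | c <;> simp

-- ===== VERDICT (by name: the statement is the Claim_ definition above) =====
theorem to_may_spec : Claim_equal_to_may := by
  intro x _ _
  unfold Spec_to_may
  by_cases h : x < 20
  · exact small_case x h
  · obtain ⟨k, hk, h1, h2⟩ := findPw_spec x 1 (by omega) (by omega)
    simp only [one_mul] at hk h1 h2
    rw [to_may, hk, loopA_eq k x [] (by omega) h2, alt_eq k x h1 h2]
    simp
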